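-- pv_equiv track=rewrite | github.com/alexvy86/advent-of-code-2017 | day3.py | sequence_for_ring
-- ===== SOURCE A (Python) =====
-- def sequence_for_ring(ring_number):
--     '''
--     Returns the sequence whose entries are the number of steps required to reach "home" for all numbers
--     in ring n, starting at the lowest number in the ring
--     '''
--
--     # Number of steps for each number, starting from the first number that gets into the ring (1,2,10,26)
--     # 0,
--     # 1,2,1,2,1,2,1,2
--     # 3,2,3,4,3,2,3,4,3,2,3,4,3,2,3,4
--     # 5,4,3,4,5,6,5,4,3,4,5,6,5,4,3,4,5,6,5,4,3,4,5,6
--     # For each ring n, create a sequence that goes from n to 2*n, then back to n+1, and repeats 4 times. Starting with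
--     #  ring 2, the last (n-1) items of the sequence need to be shifted to the beginning (this accounts for the fact)
--     #  that in general the lowest number in a ring is not the one directly to the right of 1, but (n-1) steps below it.
--
--     if ring_number == 0:
--         return [0]
--     else:
--         first_part = list(range(ring_number, 2*ring_number))
--         pyramid_without_last_item = (first_part + [2*ring_number] + list(reversed(first_part))[:-1]) # Remove last entry in the reversed list
--         full_sequence = pyramid_without_last_item * 4  # Repeat it four times
--         if (ring_number >= 2):
--             for _ in range(1, ring_number):
--                 full_sequence.insert(0, full_sequence.pop()) # Rotate the last item to the front of the list
--         return full_sequence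
-- ===== SOURCE B (Python) =====
-- def sequence_for_ring(ring_number):
--     # Closed form per index: no pyramid list, no reversal, no rotation loop.
--     if ring_number == 0:
--         return [0]
--     n = ring_number
--     return [2*n - abs((i - (n - 1)) % (2*n) - n) for i in range(8*n)]
-- ===== Notes on version B (the rewrite author's own statement) =====
-- stated objective: faster
-- what changed: Replaced A's build-pyramid-list, repeat-four-times, rotate-via-insert(0,pop()) construction with a single comprehension over the ring's indices computing each step count by a closed-form formula (modulus and absolute value).
-- outside the precondition, e.g. on sequence_for_ring(-2): A returns [-4, -4, -4, -4], B returns []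
import Mathlib
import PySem

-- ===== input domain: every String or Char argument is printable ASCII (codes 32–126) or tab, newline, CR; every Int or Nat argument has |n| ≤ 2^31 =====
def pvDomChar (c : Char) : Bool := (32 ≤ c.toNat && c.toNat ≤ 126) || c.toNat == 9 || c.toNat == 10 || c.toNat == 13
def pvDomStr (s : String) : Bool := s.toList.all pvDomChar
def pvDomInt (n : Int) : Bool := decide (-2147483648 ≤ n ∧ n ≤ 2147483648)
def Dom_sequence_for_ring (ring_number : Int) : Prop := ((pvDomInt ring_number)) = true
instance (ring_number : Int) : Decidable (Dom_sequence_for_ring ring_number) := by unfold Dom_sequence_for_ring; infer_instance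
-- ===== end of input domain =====

-- B replaces A's build-pyramid/repeat/rotate-by-insert(0,pop()) construction with a single
-- per-index closed-form comprehension (objective: faster — A's rotation loop is quadratic).

-- ===== PORT A =====
-- helper: one iteration of A's rotation loop, full_sequence.insert(0, full_sequence.pop())
def pvRotStep (l : List Int) : List Int :=
  match PySem.List.pop? l (-1) with
  | some (v, rest) => PySem.List.insert rest 0 v
  | none => l

def sequence_for_ring (ring_number : Int) : List Int :=
  if ring_number == 0 then [0]
  else
    let first_part := PySem.List.pyRange ring_number (2*ring_number) 1
    let pyramid_without_last_item :=
      first_part ++ [2*ring_number] ++ PySem.List.slice first_part.reverse none (some (-1))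
    let full_sequence := PySem.List.pyRepeat pyramid_without_last_item 4
    if ring_number ≥ 2 then
      (PySem.List.pyRange 1 ring_number 1).foldl (fun l _ => pvRotStep l) full_sequence
    else full_sequence

-- ===== PORT B =====
def sequence_for_ring_alt (ring_number : Int) : List Int :=
  if ring_number == 0 then [0]
  else
    (PySem.List.pyRange 0 (8*ring_number) 1).map
      (fun i => 2*ring_number -
        |PySem.Int.mod (i - (ring_number - 1)) (2*ring_number) - ring_number|)

-- ===== PRECONDITION & SPEC =====
-- Pre_ restricts to the natural domain of non-negative ring indices: for a negative ring_number
-- (a malformed ring count) A's empty range accidentally yields a four-element list of doubled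
-- ring numbers while B's comprehension over an empty range yields [].
def Pre_sequence_for_ring (ring_number : Int) : Prop := 0 ≤ ring_number
instance (ring_number : Int) : Decidable (Pre_sequence_for_ring ring_number) := by
  unfold Pre_sequence_for_ring; infer_instance

def pvWitness_sequence_for_ring : Int := 3

def Spec_sequence_for_ring (ring_number : Int) (out : List Int) : Prop :=
  out = sequence_for_ring_alt ring_number
instance (ring_number : Int) (out : List Int) : Decidable (Spec_sequence_for_ring ring_number out) := by
  unfold Spec_sequence_for_ring; infer_instance

-- ===== CLAIM (what is proved, stated in full; the proofs are below) =====
def Claim_equal_sequence_for_ring : Prop :=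
  ∀ (ring_number : Int), Dom_sequence_for_ring ring_number →
    Pre_sequence_for_ring ring_number →
    Spec_sequence_for_ring ring_number (sequence_for_ring ring_number)

-- ===== LEMMAS AND PROOFS =====

-- the per-index step count, as a function of the (already rotated) offset
def pvH (n i : Int) : Int := 2*n - |PySem.Int.mod i (2*n) - n|

lemma pvH_period (n : Int) (hn : 0 < n) (i : Int) : pvH n (i - 2*n) = pvH n i := by
  unfold pvH
  rw [PySem.Int.mod_eq_emod_of_pos (by omega), PySem.Int.mod_eq_emod_of_pos (by omega),
      Int.sub_emod_right]

lemma pvH_period8 (n : Int) (hn : 0 < n) (i : Int) : pvH n (i - 8*n) = pvH n i := by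
  have h1 := pvH_period n hn (i - 6*n)
  have h2 := pvH_period n hn (i - 4*n)
  have h3 := pvH_period n hn (i - 2*n)
  rw [show i - 6*n - 2*n = i - 8*n by ring] at h1
  rw [show i - 4*n - 2*n = i - 6*n by ring] at h2
  rw [show i - 2*n - 2*n = i - 4*n by ring] at h3
  rw [h1, h2, h3, pvH_period n hn i]

-- the rising half of the pyramid is the tent function on [0, n)
lemma pvSeg1 (n : Int) (hn : 1 ≤ n) :
    (PySem.List.pyRange 0 n 1).map (fun j => 2*n - |j - n|) = PySem.List.pyRange n (2*n) 1 := by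
  rw [PySem.List.pyRange_one 0 n, PySem.List.pyRange_one n (2*n), List.map_map,
      show 2*n - n = n - 0 by ring]
  apply List.map_congr_left
  intro k hk
  simp only [Function.comp_apply]
  have hk' : (k : Int) < n := by
    simp only [List.mem_range] at hk; omega
  rw [abs_of_nonpos (by omega)]
  ring

-- the peak-and-descent half is the tent function on [n, 2n)
lemma pvSeg2 (n : Int) (hn : 1 ≤ n) :
    (PySem.List.pyRange n (2*n) 1).map (fun j => 2*n - |j - n|)
      = [2*n] ++ (PySem.List.pyRange n (2*n) 1).reverse.dropLast := by
  rw [PySem.List.pyRange_one n (2*n), show 2*n - n = n by ring, List.map_map]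
  have hm : ((n.toNat : Int)) = n := Int.toNat_of_nonneg (by omega)
  apply List.ext_getElem
  · simp; omega
  · intro i h1 h2
    simp only [List.length_map, List.length_range] at h1
    match i, h1 with
    | 0, _ =>
      rw [List.getElem_append_left (by simp)]
      simp
    | (j+1), h1 =>
      rw [List.getElem_append_right (by simp)]
      simp only [List.getElem_map, List.getElem_range, Function.comp_apply,
        List.getElem_dropLast, List.getElem_reverse, List.length_map,
        List.length_range, List.length_cons, List.length_nil]
      rw [abs_of_nonneg (by push_cast; omega)]
      omega

-- A's pyramid list is the closed-form tent over one period
lemma pvPyramid_eq (n : Int) (hn : 1 ≤ n) :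
    PySem.List.pyRange n (2*n) 1 ++ [2*n] ++ (PySem.List.pyRange n (2*n) 1).reverse.dropLast
      = (PySem.List.pyRange 0 (2*n) 1).map (fun j => 2*n - |j - n|) := by
  rw [PySem.List.pyRange_one_append (a := 0) (m := n) (b := 2*n) (by omega) (by omega),
      List.map_append, pvSeg1 n hn, pvSeg2 n hn, List.append_assoc]

lemma pvRepeat_four (l : List Int) : PySem.List.pyRepeat l 4 = l ++ (l ++ (l ++ (l ++ []))) := rfl

-- pvH over one aligned period-chunk is the tent
lemma pvChunk (n : Int) (hn : 1 ≤ n) (a b : Int) (hb : b = a + 2*n) (m : Int) (ha : a = 2*n*m) :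
    (PySem.List.pyRange a b 1).map (pvH n)
      = (PySem.List.pyRange 0 (2*n) 1).map (fun j => 2*n - |j - n|) := by
  subst hb; subst ha
  rw [PySem.List.pyRange_one, PySem.List.pyRange_one 0 (2*n), List.map_map, List.map_map,
      show 2*n*m + 2*n - (2*n*m) = 2*n - 0 by ring]
  apply List.map_congr_left
  intro k hk
  have hk' : (k : Int) < 2*n := by
    simp only [List.mem_range] at hk; omega
  simp only [Function.comp_apply]
  unfold pvH
  rw [PySem.Int.mod_eq_emod_of_pos (by omega),
      show 2*n*m + (k:Int) = (k:Int) + (2*n)*m by ring, Int.add_mul_emod_self_left,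
      Int.emod_eq_of_lt (by omega) (by omega), zero_add]

-- the repeated pyramid is pvH over [0, 8n)
lemma pvFull_eq (n : Int) (hn : 1 ≤ n) :
    PySem.List.pyRepeat
        (PySem.List.pyRange n (2*n) 1 ++ [2*n] ++ (PySem.List.pyRange n (2*n) 1).reverse.dropLast) 4
      = (PySem.List.pyRange 0 (8*n) 1).map (pvH n) := by
  rw [pvRepeat_four, pvPyramid_eq n hn,
      PySem.List.pyRange_one_append (a := 0) (m := 2*n) (b := 8*n) (by omega) (by omega),
      PySem.List.pyRange_one_append (a := 2*n) (m := 4*n) (b := 8*n) (by omega) (by omega),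
      PySem.List.pyRange_one_append (a := 4*n) (m := 6*n) (b := 8*n) (by omega) (by omega),
      List.map_append, List.map_append, List.map_append,
      pvChunk n hn 0 (2*n) (by ring) 0 (by ring),
      pvChunk n hn (2*n) (4*n) (by ring) 1 (by ring),
      pvChunk n hn (4*n) (6*n) (by ring) 2 (by ring),
      pvChunk n hn (6*n) (8*n) (by ring) 3 (by ring)]
  simp

lemma pvFoldl_const_iterate {γ : Type} (f : List Int → List Int) (l : List γ) (x : List Int) :
    l.foldl (fun acc _ => f acc) x = f^[l.length] x := by
  induction l generalizing x with
  | nil => simp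
  | cons a t ih => simp [List.foldl_cons, ih, Function.iterate_succ_apply]

-- one rotation of a mapped range shifts the argument by one (h periodic with period L)
lemma pvRotStep_map (h : Int → Int) (L : Int) (hL : 0 < L)
    (hper : ∀ i, h (i - L) = h i) :
    pvRotStep ((PySem.List.pyRange 0 L 1).map h)
      = (PySem.List.pyRange 0 L 1).map (fun i => h (i - 1)) := by
  have hsplit : PySem.List.pyRange 0 L 1 = PySem.List.pyRange 0 (L-1) 1 ++ [L-1] := by
    have h2 := PySem.List.pyRange_one_succ_right (a := 0) (b := L-1) (by omega)
    rw [sub_add_cancel] at h2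
    exact h2
  conv_lhs => rw [hsplit]
  conv_rhs => rw [PySem.List.pyRange_one_cons hL]
  rw [List.map_append, List.map_cons, List.map_cons, List.map_nil]
  unfold pvRotStep
  rw [PySem.List.pop?_last]
  simp only [PySem.List.insert, PySem.List.sliceIndices]
  norm_num
  constructor
  · have := hper (L - 1)
    rw [show L - 1 - L = 0 - 1 by ring] at this
    exact this.symm
  · rw [PySem.List.pyRange_one 0 (L-1), PySem.List.pyRange_one 1 L,
        List.map_map, List.map_map, show L - 1 - 0 = L - 1 by ring]
    apply List.map_congr_left
    intro k _
    simp only [Function.comp_apply]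
    congr 1
    omega

lemma pvIter_rot (h : Int → Int) (L : Int) (hL : 0 < L)
    (hper : ∀ i, h (i - L) = h i) (k : Nat) :
    pvRotStep^[k] ((PySem.List.pyRange 0 L 1).map h)
      = (PySem.List.pyRange 0 L 1).map (fun i => h (i - k)) := by
  induction k with
  | zero => simp
  | succ k ih =>
    rw [Function.iterate_succ_apply', ih]
    have hper' : ∀ i, (fun i => h (i - k)) (i - L) = (fun i => h (i - k)) i := by
      intro i
      have := hper (i - k)
      simpa [sub_right_comm] using this
    rw [pvRotStep_map (fun i => h (i - k)) L hL hper']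
    apply List.map_congr_left
    intro i _
    congr 1
    push_cast; ring

-- A's result, in closed form
lemma pvA_eq (n : Int) (hn : 1 ≤ n) :
    sequence_for_ring n
      = (PySem.List.pyRange 0 (8*n) 1).map (fun i => pvH n (i - (n - 1))) := by
  have h0 : ¬ ((n == 0) = true) := by simp; omega
  unfold sequence_for_ring
  rw [if_neg h0]
  simp only [PySem.List.slice_to_neg_one]
  by_cases h2 : n ≥ 2
  · rw [if_pos h2, pvFull_eq n hn, pvFoldl_const_iterate pvRotStep,
        PySem.List.length_pyRange_one,
        pvIter_rot (pvH n) (8*n) (by omega) (pvH_period8 n (by omega))]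
    apply List.map_congr_left
    intro i _
    congr 1
    have ht : (((n - 1).toNat : Int)) = n - 1 := Int.toNat_of_nonneg (by omega)
    omega
  · have hn1 : n = 1 := by omega
    subst hn1
    rw [if_neg h2, pvFull_eq 1 (by norm_num)]
    apply List.map_congr_left
    intro i _
    norm_num

-- ===== VERDICT (by name: the statement is the Claim_ definition above) =====
theorem sequence_for_ring_spec : Claim_equal_sequence_for_ring := by
  intro n _ hpre
  unfold Spec_sequence_for_ring sequence_for_ring_alt
  by_cases h0 : n = 0
  · subst h0; simp [sequence_for_ring]
  · have hn : 1 ≤ n := by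
      unfold Pre_sequence_for_ring at hpre; omega
    rw [pvA_eq n hn]
    simp only [beq_iff_eq, h0, if_false]
    apply List.map_congr_left
    intro i _
    simp [pvH]
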